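-- pv_equiv track=rewrite | github.com/cataluna84/VisionInterpretability | scripts/switch_to_local_dataset.py | _to_source_lines
-- ===== SOURCE A (Python) =====
-- def _to_source_lines(code_str: str) -> list[str]:
--     """Convert a code string to JSON source array format."""
--     lines = code_str.split("\n")
--     result = []
--     for i, line in enumerate(lines):
--         if i < len(lines) - 1:
--             result.append(line + "\n")
--         elif line:
--             result.append(line)
--     return result
-- ===== SOURCE B (Python) =====
-- import re
--
-- _LINE_RE = re.compile(r'[^\n]*\n|[^\n]+')
--
--
-- def _to_source_lines(code_str: str) -> list[str]:
--     """Convert a code string to JSON source array format."""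
--     # One regex scan: a line with its '\n', or a trailing unterminated line.
--     return _LINE_RE.findall(code_str)
-- ===== Notes on version B (the rewrite author's own statement) =====
-- stated objective: idiomatic
-- what changed: Replaced splitting on the newline separator followed by an index-counting loop that re-appends line terminators and drops an empty tail piece with a single compiled-regex scan (re.findall with pattern 'non-newline run ending in a newline, or trailing non-newline run') that yields the lines directly in one pass.
import Mathlib
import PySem

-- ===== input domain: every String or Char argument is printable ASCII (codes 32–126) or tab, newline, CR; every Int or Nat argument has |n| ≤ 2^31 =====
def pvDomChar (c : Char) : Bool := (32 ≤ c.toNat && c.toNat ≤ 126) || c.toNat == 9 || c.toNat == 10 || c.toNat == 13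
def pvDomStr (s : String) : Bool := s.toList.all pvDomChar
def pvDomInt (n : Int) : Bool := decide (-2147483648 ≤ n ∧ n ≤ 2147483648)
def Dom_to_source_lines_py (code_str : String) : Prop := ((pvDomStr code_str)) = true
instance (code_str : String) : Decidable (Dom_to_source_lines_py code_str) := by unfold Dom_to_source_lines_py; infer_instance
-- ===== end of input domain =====

-- B replaces A's split-then-reindex loop by a single regex scan (`[^\n]*\n|[^\n]+`): one pass, no index bookkeeping (objective: idiomatic).

-- ===== PORT A =====
-- lines = code_str.split("\n"); then the indexed loop appending line+"\n" for all but
-- the last split piece, and the last piece only if non-empty.  Strings are handled as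
-- List Char (the PySem bridge) and rebuilt with String.mk at the end.
def to_source_lines_py (code_str : String) : List String :=
  let lines : List (List Char) := PySem.Chars.splitOn code_str.toList ['\n']
  let result : List (List Char) :=
    (lines.foldl
      (fun (st : Int × List (List Char)) line =>
        let i := st.1
        let result := st.2
        (i + 1,
          if i < (lines.length : Int) - 1 then result ++ [line ++ ['\n']]
          else if line ≠ [] then result ++ [line]
          else result))
      (0, [])).2
  result.map String.mk

-- ===== PORT B =====
-- Hand port of the regex scan `[^\n]*\n|[^\n]+` (exact: the pattern splits only on '\n'):
-- one left-to-right pass accumulating the current match; '\n' closes a match keeping the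
-- newline; a non-empty trailing run is emitted without one.
def tslAltGo (cur : List Char) : List Char → List (List Char)
  | [] => if cur = [] then [] else [cur.reverse]
  | c :: rest =>
    if c = '\n' then (cur.reverse ++ ['\n']) :: tslAltGo [] rest
    else tslAltGo (c :: cur) rest

def to_source_lines_py_alt (code_str : String) : List String :=
  (tslAltGo [] code_str.toList).map String.mk

-- ===== PRECONDITION & SPEC =====
def Spec_to_source_lines_py (code_str : String) (out : List String) : Prop := out = to_source_lines_py_alt code_str
instance (code_str : String) (out : List String) : Decidable (Spec_to_source_lines_py code_str out) := by unfold Spec_to_source_lines_py; infer_instance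

-- ===== CLAIM (what is proved, stated in full; the proofs are below) =====
def Claim_equal_to_source_lines_py : Prop := ∀ (code_str : String), Dom_to_source_lines_py code_str → Spec_to_source_lines_py code_str (to_source_lines_py code_str)

-- ===== LEMMAS AND PROOFS =====

-- Accumulator-form characterisation of splitting on '\n'.
def tslFront (cur : List Char) : List Char → List (List Char)
  | [] => [cur.reverse]
  | c :: rest =>
    if c = '\n' then cur.reverse :: tslFront [] rest
    else tslFront (c :: cur) rest

theorem tslFront_ne_nil (cur cs : List Char) : tslFront cur cs ≠ [] := by
  induction cs generalizing cur with
  | nil => simp [tslFront]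
  | cons c rest ih => simp only [tslFront]; split_ifs <;> simp [ih]

theorem splitOn_go_newline (fuel : Nat) (l cur : List Char) (accs : List (List Char))
    (h : l.length < fuel) :
    PySem.Chars.splitOn.go ['\n'] fuel l cur accs = accs.reverse ++ tslFront cur l := by
  induction fuel generalizing l cur accs with
  | zero => omega
  | succ fuel ih =>
    cases l with
    | nil => simp [PySem.Chars.splitOn.go, tslFront]
    | cons c rest =>
      have hlen : rest.length < fuel := by simp at h; omega
      by_cases hc : c = '\n'
      · subst hc
        rw [show PySem.Chars.splitOn.go ['\n'] (fuel + 1) ('\n' :: rest) cur accs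
              = PySem.Chars.splitOn.go ['\n'] fuel rest [] (cur.reverse :: accs) by
            simp [PySem.Chars.splitOn.go, List.isPrefixOf]]
        rw [ih rest [] _ hlen]
        simp [tslFront]
      · rw [show PySem.Chars.splitOn.go ['\n'] (fuel + 1) (c :: rest) cur accs
              = PySem.Chars.splitOn.go ['\n'] fuel rest (c :: cur) accs by
            simp [PySem.Chars.splitOn.go, List.isPrefixOf, Ne.symm hc]]
        rw [ih rest (c :: cur) _ hlen]
        simp [tslFront, hc]

theorem splitOn_newline (cs : List Char) :
    PySem.Chars.splitOn cs ['\n'] = tslFront [] cs := by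
  unfold PySem.Chars.splitOn
  simpa using splitOn_go_newline (cs.length + 1) cs [] [] (by omega)

-- Closed form of A's indexed loop: every piece but the last gets '\n', the last
-- survives only if non-empty.
def tslCF (ls : List (List Char)) : List (List Char) :=
  ls.dropLast.map (fun l => l ++ ['\n']) ++
    (match ls.getLast? with
      | none => []
      | some x => if x = [] then [] else [x])

theorem tslCF_cons (a : List Char) (ls : List (List Char)) (h : ls ≠ []) :
    tslCF (a :: ls) = (a ++ ['\n']) :: tslCF ls := by
  cases ls with
  | nil => exact absurd rfl h
  | cons b t => simp [tslCF]

theorem afold_go (ls : List (List Char)) (n i : Int) (acc : List (List Char))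
    (h : i + ls.length = n) :
    (ls.foldl
      (fun (st : Int × List (List Char)) line =>
        (st.1 + 1,
          if st.1 < n - 1 then st.2 ++ [line ++ ['\n']]
          else if line ≠ [] then st.2 ++ [line]
          else st.2))
      (i, acc)).2 = acc ++ tslCF ls := by
  induction ls generalizing i acc with
  | nil => simp [tslCF]
  | cons a t ih =>
    cases t with
    | nil =>
      have : ¬ i < n - 1 := by simp at h; omega
      simp only [List.foldl_cons, List.foldl_nil, if_neg this, tslCF]
      split_ifs <;> simp_all
    | cons b t' =>
      have hlt : i < n - 1 := by simp at h; omega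
      rw [List.foldl_cons]
      simp only [if_pos hlt]
      rw [ih (i + 1) (acc ++ [a ++ ['\n']]) (by simp at h ⊢; omega),
        tslCF_cons a (b :: t') (by simp)]
      simp

theorem tslCF_front_eq_altGo (cs cur : List Char) :
    tslCF (tslFront cur cs) = tslAltGo cur cs := by
  induction cs generalizing cur with
  | nil =>
    simp only [tslFront, tslAltGo, tslCF]
    rcases eq_or_ne cur ([] : List Char) with h | h
    · simp [h]
    · simp [h, (by simpa using h : cur.reverse ≠ [])]
  | cons c rest ih =>
    by_cases hc : c = '\n'
    · subst hc
      rw [show tslFront cur ('\n' :: rest) = cur.reverse :: tslFront [] rest by simp [tslFront],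
        show tslAltGo cur ('\n' :: rest) = (cur.reverse ++ ['\n']) :: tslAltGo [] rest by
          simp [tslAltGo],
        tslCF_cons _ _ (tslFront_ne_nil [] rest), ih []]
    · simp only [tslFront, tslAltGo, if_neg hc]
      exact ih (c :: cur)

-- ===== VERDICT (by name: the statement is the Claim_ definition above) =====
theorem to_source_lines_py_spec : Claim_equal_to_source_lines_py := by
  intro code_str _
  unfold Spec_to_source_lines_py to_source_lines_py to_source_lines_py_alt
  simp only [splitOn_newline]
  rw [show (0 : Int) = (0 : Int) + ((tslFront [] code_str.toList).length : Int) - (tslFront [] code_str.toList).length by ring]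
  rw [afold_go _ _ _ _ (by ring)]
  rw [tslCF_front_eq_altGo]
  simp
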